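-- pv_equiv track=rewrite | github.com/pwn-compsci/cse-shared | common/checker.py | ignore_existing_content
-- ===== SOURCE A (Python) =====
-- def ignore_existing_content(added_lines, old_lines, diff):
--     found = 0
--     total = 0
--     old_text = ''.join(old_lines)
--     for line in added_lines:
--         stripped_line = line.strip()
--         if (len(stripped_line)) == 0:
--             continue
--         if stripped_line in old_text:
--             found += len(line)
--
--         total +=len(line)
--
--     if total == 0:
--         return True
--
--     #print (f"{found=} {total=} {total - found=}\n")
--
--     return total - found
-- ===== SOURCE B (Python) =====
-- def ignore_existing_content(added_lines, old_lines, diff):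
--     old_text = ''.join(old_lines)
--     sizes = {}
--     for line in added_lines:
--         key = line.strip()
--         if key:
--             sizes[key] = sizes.get(key, 0) + len(line)
--     return sum(v for k, v in sizes.items() if k not in old_text)
-- ===== Notes on version B (the rewrite author's own statement) =====
-- stated objective: alternative
-- what changed: B groups added lines by their stripped value in a dict built in one pass and sums, per DISTINCT stripped value not occurring in old_text, the accumulated original lengths, so the substring scan of old_text runs once per distinct line instead of once per line; it computes the complementary 'missing' sum directly instead of found/total counters and a subtraction.
-- outside the precondition, e.g. on ignore_existing_content(['  '], [], ''): A returns True, B returns 0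
import Mathlib
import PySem

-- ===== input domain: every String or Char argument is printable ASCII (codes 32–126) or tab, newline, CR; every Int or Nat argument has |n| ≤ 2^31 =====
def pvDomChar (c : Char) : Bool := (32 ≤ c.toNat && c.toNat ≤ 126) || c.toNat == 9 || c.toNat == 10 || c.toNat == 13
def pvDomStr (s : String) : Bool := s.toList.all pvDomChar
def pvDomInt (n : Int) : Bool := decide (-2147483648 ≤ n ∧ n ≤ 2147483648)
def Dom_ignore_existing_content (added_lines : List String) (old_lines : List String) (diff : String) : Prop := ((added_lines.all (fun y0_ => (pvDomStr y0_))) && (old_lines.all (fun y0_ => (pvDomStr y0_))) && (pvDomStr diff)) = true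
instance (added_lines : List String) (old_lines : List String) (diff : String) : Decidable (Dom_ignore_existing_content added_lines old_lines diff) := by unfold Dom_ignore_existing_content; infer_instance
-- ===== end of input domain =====

-- B replaces A's per-line substring scan by a dict that groups added lines by stripped value,
-- testing each distinct stripped value against old_text once and summing the complementary
-- ("missing") lengths directly; equivalence is proved wherever some added line is non-blank.

-- ===== PORT A =====
def ignore_existing_content (added_lines : List String) (old_lines : List String) (diff : String) : Int :=
  let old_text := PySem.Str.join "" old_lines
  let p := added_lines.foldl (fun (p : Int × Int) line =>
      let stripped_line := PySem.Str.strip line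
      if PySem.Str.len stripped_line = 0 then p
      else ((if PySem.Str.isIn stripped_line old_text then p.1 + PySem.Str.len line else p.1),
            p.2 + PySem.Str.len line)) (0, 0)
  -- Python returns the bool True when total == 0 (not an int); that case is outside Pre_ below.
  if p.2 = 0 then 1 else p.2 - p.1

-- ===== PORT B =====
def ignore_existing_content_alt (added_lines : List String) (old_lines : List String) (diff : String) : Int :=
  let old_text := PySem.Str.join "" old_lines
  let sizes := added_lines.foldl (fun (d : PySem.Dict String Int) line =>
      let key := PySem.Str.strip line
      if PySem.Str.len key = 0 then d
      else d.insert key (d.getD key 0 + PySem.Str.len line)) PySem.Dict.empty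
  ((sizes.items.filter (fun kv => !PySem.Str.isIn kv.1 old_text)).map (fun kv => kv.2)).sum

-- ===== PRECONDITION & SPEC =====
-- Pre_ excludes inputs whose added lines are all blank after strip: there A returns the bool
-- True, which is not a value of the declared Int return type; B returns 0.
def Pre_ignore_existing_content (added_lines : List String) (old_lines : List String) (diff : String) : Prop :=
  ∃ line ∈ added_lines, PySem.Str.len (PySem.Str.strip line) ≠ 0
instance (added_lines : List String) (old_lines : List String) (diff : String) : Decidable (Pre_ignore_existing_content added_lines old_lines diff) := by unfold Pre_ignore_existing_content; infer_instance
def pvWitness_ignore_existing_content : List String × List String × String := (["x"], [], "")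

def Spec_ignore_existing_content (added_lines : List String) (old_lines : List String) (diff : String) (out : Int) : Prop := out = ignore_existing_content_alt added_lines old_lines diff
instance (added_lines : List String) (old_lines : List String) (diff : String) (out : Int) : Decidable (Spec_ignore_existing_content added_lines old_lines diff out) := by unfold Spec_ignore_existing_content; infer_instance

-- ===== CLAIM (what is proved, stated in full; the proofs are below) =====
def Claim_equal_ignore_existing_content : Prop := ∀ (added_lines : List String) (old_lines : List String) (diff : String), Dom_ignore_existing_content added_lines old_lines diff → Pre_ignore_existing_content added_lines old_lines diff → Spec_ignore_existing_content added_lines old_lines diff (ignore_existing_content added_lines old_lines diff)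

-- ===== LEMMAS AND PROOFS =====

-- sum of the "missing" lengths: lines that are non-blank and whose strip is not in old_text
def pvMiss (old_text : String) (lines : List String) : Int :=
  (lines.map (fun line =>
    if PySem.Str.len (PySem.Str.strip line) = 0 ∨ PySem.Str.isIn (PySem.Str.strip line) old_text
    then 0 else PySem.Str.len line)).sum

-- sum of the lengths of the non-blank lines (A's `total`)
def pvTot (lines : List String) : Int :=
  (lines.map (fun line =>
    if PySem.Str.len (PySem.Str.strip line) = 0 then 0 else PySem.Str.len line)).sum

-- the sum B takes over a dict's item list
def pvS (old_text : String) (l : List (String × Int)) : Int :=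
  ((l.filter (fun kv => !PySem.Str.isIn kv.1 old_text)).map (fun kv => kv.2)).sum

theorem pvS_cons (old : String) (p : String × Int) (l : List (String × Int)) :
    pvS old (p :: l) = (if PySem.Str.isIn p.1 old then 0 else p.2) + pvS old l := by
  unfold pvS
  by_cases hin : PySem.Chars.isIn p.1.toList old.toList = true <;>
    simp [PySem.Str.isIn_eq, hin]

theorem pvLen_nonneg (s : String) : 0 ≤ PySem.Str.len s := by
  rw [PySem.Str.len_eq]; exact_mod_cast Nat.zero_le _

theorem pvLen_pos_of_strip (s : String) (h : PySem.Str.len (PySem.Str.strip s) ≠ 0) :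
    0 < PySem.Str.len s := by
  rcases Nat.eq_zero_or_pos s.toList.length with h0 | hp
  · exfalso
    apply h
    have hnil : s.toList = [] := List.eq_nil_of_length_eq_zero h0
    rw [PySem.Str.len_eq, PySem.Str.toList_strip, hnil]
    simp [PySem.Chars.strip, PySem.Chars.lstrip, PySem.Chars.rstrip]
  · rw [PySem.Str.len_eq]; exact_mod_cast hp

theorem pvTot_pos (lines : List String)
    (h : ∃ line ∈ lines, PySem.Str.len (PySem.Str.strip line) ≠ 0) :
    0 < pvTot lines := by
  obtain ⟨w, hw, hws⟩ := h
  have hmem : (if PySem.Str.len (PySem.Str.strip w) = 0 then (0:Int) else PySem.Str.len w)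
      ∈ lines.map (fun line => if PySem.Str.len (PySem.Str.strip line) = 0 then (0:Int) else PySem.Str.len line) :=
    List.mem_map_of_mem hw
  have hone : (0:Int) < (if PySem.Str.len (PySem.Str.strip w) = 0 then (0:Int) else PySem.Str.len w) := by
    rw [if_neg hws]; exact pvLen_pos_of_strip w hws
  have hle := List.single_le_sum (l := lines.map (fun line => if PySem.Str.len (PySem.Str.strip line) = 0 then (0:Int) else PySem.Str.len line))
    (fun x hx => by
      obtain ⟨y, _, rfl⟩ := List.mem_map.mp hx
      split
      · exact le_refl 0
      · exact pvLen_nonneg y) _ hmem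
  unfold pvTot
  omega

theorem pvA_inv (old_text : String) (lines : List String) (f t : Int) :
    (lines.foldl (fun (p : Int × Int) line =>
      if PySem.Str.len (PySem.Str.strip line) = 0 then p
      else ((if PySem.Str.isIn (PySem.Str.strip line) old_text then p.1 + PySem.Str.len line else p.1),
            p.2 + PySem.Str.len line)) (f, t))
    = (f + (pvTot lines - pvMiss old_text lines), t + pvTot lines) := by
  induction lines generalizing f t with
  | nil => simp [pvTot, pvMiss]
  | cons line rest ih =>
    simp only [List.foldl_cons]
    by_cases h0 : PySem.Str.len (PySem.Str.strip line) = 0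
    · rw [if_pos h0, ih]
      simp only [pvTot, pvMiss, List.map_cons, List.sum_cons]
      rw [if_pos h0, if_pos (Or.inl h0)]
      simp only [Prod.mk.injEq]
      constructor <;> ring
    · rw [if_neg h0]
      by_cases hin : PySem.Str.isIn (PySem.Str.strip line) old_text
      · rw [if_pos hin, ih]
        simp only [pvTot, pvMiss, List.map_cons, List.sum_cons]
        rw [if_neg h0, if_pos (Or.inr hin)]
        simp only [Prod.mk.injEq]
        constructor <;> ring
      · rw [if_neg hin, ih]
        simp only [pvTot, pvMiss, List.map_cons, List.sum_cons]
        rw [if_neg h0, if_neg (by tauto : ¬ (PySem.Str.len (PySem.Str.strip line) = 0 ∨ PySem.Str.isIn (PySem.Str.strip line) old_text))]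
        simp only [Prod.mk.injEq]
        constructor <;> ring

theorem pvMapId (k : String) (w : String × Int) (l : List (String × Int))
    (h : ∀ p ∈ l, p.1 ≠ k) :
    l.map (fun p => if p.1 == k then w else p) = l := by
  induction l with
  | nil => rfl
  | cons a t ih =>
    simp only [List.map_cons]
    rw [if_neg (by simpa using h a (by simp)),
        ih (fun p hp => h p (List.mem_cons_of_mem a hp))]

theorem pvS_map_update (old k : String) (n : Int) (l : List (String × Int)) (v0 : Int)
    (hnd : (l.map (fun x => x.1)).Nodup) (hm : (k, v0) ∈ l) :
    pvS old (l.map (fun p => if p.1 == k then (k, v0 + n) else p))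
      = pvS old l + (if PySem.Str.isIn k old then 0 else n) := by
  induction l with
  | nil => cases hm
  | cons a t ih =>
    simp only [List.map_cons, List.nodup_cons] at hnd
    obtain ⟨ha, hndt⟩ := hnd
    rcases List.mem_cons.mp hm with heq | hmt
    · -- head is the updated pair
      rcases heq.symm with rfl
      simp only [List.map_cons]
      rw [if_pos (by simp)]
      have hid : t.map (fun p => if p.1 == k then ((k : String), v0 + n) else p) = t := by
        apply pvMapId
        intro p hp hpk
        exact ha (by simpa [hpk] using List.mem_map_of_mem (f := fun x => x.1) hp)
      rw [hid, pvS_cons, pvS_cons]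
      by_cases hin : PySem.Chars.isIn k.toList old.toList = true <;>
        simp [PySem.Str.isIn_eq, hin] <;> omega
    · -- head untouched, recurse
      have hak : a.1 ≠ k := by
        intro he
        exact ha (by
          have := List.mem_map_of_mem (f := fun x => x.1) hmt
          simpa [he] using this)
      simp only [List.map_cons]
      rw [if_neg (by simpa using hak), pvS_cons, pvS_cons, ih hndt hmt]
      ring

theorem pvS_insert (old_text : String) (d : PySem.Dict String Int) (k : String) (n : Int)
    (hnd : d.keys.Nodup) :
    pvS old_text (d.insert k (d.getD k 0 + n)).items
      = pvS old_text d.items + (if PySem.Str.isIn k old_text then 0 else n) := by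
  cases hc : d.contains k with
  | false =>
    rw [PySem.Dict.items_insert_of_not_contains d _ hc,
        PySem.Dict.getD_of_not_contains d 0 hc]
    unfold pvS
    by_cases hin : PySem.Chars.isIn k.toList old_text.toList = true <;>
      simp [List.filter_append, PySem.Str.isIn_eq, hin]
  | true =>
    have hk : k ∈ d.keys := (PySem.Dict.contains_iff_mem_keys d k).mp hc
    unfold PySem.Dict.keys at hk hnd
    obtain ⟨p, hp, hpk⟩ := List.mem_map.mp hk
    have hmem : (k, p.2) ∈ d.items := by
      have : p = (k, p.2) := by
        cases p
        simp only at hpk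
        simp [hpk]
      rw [← this]; exact hp
    have hget : d.getD k 0 = p.2 := PySem.Dict.getD_of_mem_items d hmem (by
      unfold PySem.Dict.keys
      exact hnd) 0
    rw [PySem.Dict.items_insert_of_contains d _ hc, hget]
    exact pvS_map_update old_text k n d.items p.2 hnd hmem

theorem pvB_inv (old_text : String) (lines : List String) (d : PySem.Dict String Int)
    (hnd : d.keys.Nodup) :
    pvS old_text (lines.foldl (fun (d : PySem.Dict String Int) line =>
      if PySem.Str.len (PySem.Str.strip line) = 0 then d
      else d.insert (PySem.Str.strip line) (d.getD (PySem.Str.strip line) 0 + PySem.Str.len line)) d).items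
      = pvS old_text d.items + pvMiss old_text lines := by
  induction lines generalizing d with
  | nil => simp [pvMiss]
  | cons line rest ih =>
    simp only [List.foldl_cons]
    by_cases h0 : PySem.Str.len (PySem.Str.strip line) = 0
    · rw [if_pos h0, ih d hnd]
      simp only [pvMiss, List.map_cons, List.sum_cons, h0]
      simp
    · rw [if_neg h0, ih _ (PySem.Dict.nodup_keys_insert d _ _ hnd), pvS_insert old_text d _ _ hnd]
      simp only [pvMiss, List.map_cons, List.sum_cons, h0, false_or]
      by_cases hin : PySem.Str.isIn (PySem.Str.strip line) old_text <;> simp [hin] <;> ring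

-- ===== VERDICT (by name: the statement is the Claim_ definition above) =====
theorem ignore_existing_content_spec : Claim_equal_ignore_existing_content := by
  intro added_lines old_lines diff _ hpre
  have htot : 0 < pvTot added_lines := pvTot_pos added_lines hpre
  have hB := pvB_inv (PySem.Str.join "" old_lines) added_lines PySem.Dict.empty
    PySem.Dict.nodup_keys_empty
  rw [show pvS (PySem.Str.join "" old_lines) (PySem.Dict.empty : PySem.Dict String Int).items = 0 from rfl,
      zero_add] at hB
  unfold pvS at hB
  unfold Spec_ignore_existing_content
  simp only [ignore_existing_content, ignore_existing_content_alt]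
  rw [hB, pvA_inv]
  rw [if_neg (by omega : ¬ ((0:Int) + pvTot added_lines = 0))]
  omega
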